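-- pv_equiv track=rewrite | github.com/HallAlexander/Python | VS Code/Python/Kattis/rational_sequence2.py | find_goal
-- ===== SOURCE A (Python) =====
-- def find_goal(p, q):
--     goal = 1
--     while (p, q) != (1, 1):
--         if p > q:
--             p -= q
--             goal = goal * 2 + 1
--         else:
--             q -= p
--             goal = goal * 2
--     return goal
-- ===== SOURCE B (Python) =====
-- def find_goal(p, q):
--     # Recursive two-phase Calkin-Wilf descent: bits(p, q) returns (v, n), the
--     # value and length of the path's bit string, built by Euclid-style division
--     # (whole runs of identical bits at once); the index is then 2**n + v.
--     def bits(p, q):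
--         if (p, q) == (1, 1):
--             return (0, 0)
--         if p > q:
--             k = (p - 1) // q
--             v, m = bits(p - k * q, q)
--             return ((2**k - 1) * 2**m + v, k + m)
--         else:
--             k = (q - 1) // p
--             v, m = bits(p, q - k * p)
--             return (v, k + m)
--     v, n = bits(p, q)
--     return 2**n + v
-- ===== Notes on version B (the rewrite author's own statement) =====
-- stated objective: alternative
-- what changed: Replaces A's iterative one-subtraction-per-step accumulator loop with a recursive two-phase algorithm: a recursion computes the path's bit string as a (value, length) pair using Euclid-style division to emit whole runs of identical bits at once, and the index is assembled afterwards as 2**n + v; this trades O(p+q) loop iterations for O(log(p+q)) recursion steps, though the result itself has ~(p+q) bits so bignum arithmetic still dominates.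
import Mathlib
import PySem

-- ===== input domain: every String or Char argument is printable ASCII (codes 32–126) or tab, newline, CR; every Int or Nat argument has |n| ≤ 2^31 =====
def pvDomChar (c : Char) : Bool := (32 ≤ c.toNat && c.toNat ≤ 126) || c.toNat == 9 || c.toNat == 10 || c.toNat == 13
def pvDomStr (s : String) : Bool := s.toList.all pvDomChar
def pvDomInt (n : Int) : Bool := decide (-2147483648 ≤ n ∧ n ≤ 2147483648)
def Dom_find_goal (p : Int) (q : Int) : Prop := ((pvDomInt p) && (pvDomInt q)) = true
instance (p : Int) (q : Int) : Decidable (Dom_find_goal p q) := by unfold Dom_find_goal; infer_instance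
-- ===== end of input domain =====

-- B replaces A's subtract-one-at-a-time accumulator loop with a recursion that builds the
-- path's bit string as a (value, length) pair via Euclid-style division, then assembles 2^n + v.

-- ===== PORT A =====
-- A's while loop, fuel = p+q (enough under Pre_; fuel only makes the loop total)
def pvLoopA : Nat → Int → Int → Int → Int
  | 0, _, _, goal => goal
  | fuel + 1, p, q, goal =>
    if p = 1 ∧ q = 1 then goal
    else if p > q then pvLoopA fuel (p - q) q (goal * 2 + 1)
    else pvLoopA fuel p (q - p) (goal * 2)

def find_goal (p : Int) (q : Int) : Int := pvLoopA (p + q).toNat p q 1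

-- ===== PORT B =====
-- B's recursive helper bits(p,q) = (value, length) of the path's bit string;
-- fuel = p+q (enough under Pre_; fuel only makes the recursion total)
def pvBits : Nat → Int → Int → Int × Nat
  | 0, _, _ => (0, 0)
  | fuel + 1, p, q =>
    if p = 1 ∧ q = 1 then (0, 0)
    else if p > q then
      let k := (PySem.Int.floordiv (p - 1) q).toNat
      let r := pvBits fuel (p - (k : Int) * q) q
      ((2 ^ k - 1) * 2 ^ r.2 + r.1, k + r.2)
    else
      let k := (PySem.Int.floordiv (q - 1) p).toNat
      let r := pvBits fuel p (q - (k : Int) * p)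
      (r.1, k + r.2)

def find_goal_alt (p : Int) (q : Int) : Int :=
  let r := pvBits (p + q).toNat p q
  2 ^ r.2 + r.1

-- ===== PRECONDITION & SPEC =====
-- A's loop terminates exactly on positive coprime pairs; elsewhere A diverges, so Pre_ excludes nothing A returns on.
def Pre_find_goal (p : Int) (q : Int) : Prop := 1 ≤ p ∧ 1 ≤ q ∧ Int.gcd p q = 1
instance (p : Int) (q : Int) : Decidable (Pre_find_goal p q) := by unfold Pre_find_goal; infer_instance
def pvWitness_find_goal : Int × Int := (2, 3)

def Spec_find_goal (p : Int) (q : Int) (out : Int) : Prop := out = find_goal_alt p q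
instance (p : Int) (q : Int) (out : Int) : Decidable (Spec_find_goal p q out) := by unfold Spec_find_goal; infer_instance

-- ===== CLAIM (what is proved, stated in full; the proofs are below) =====
def Claim_equal_find_goal : Prop := ∀ (p : Int) (q : Int), Dom_find_goal p q → Pre_find_goal p q → Spec_find_goal p q (find_goal p q)

-- ===== LEMMAS AND PROOFS =====

lemma pvLoopA_base (f : Nat) (goal : Int) : pvLoopA f 1 1 goal = goal := by
  cases f <;> simp [pvLoopA]

-- k subtractions of q from p (all with p still > q) collapse to one batched update
lemma pvLoopA_iter_left (k : Nat) : ∀ (f : Nat) (p q goal : Int), 1 ≤ q → (k : Int) * q < p →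
    pvLoopA (k + f) p q goal = pvLoopA f (p - (k : Int) * q) q (goal * 2 ^ k + (2 ^ k - 1)) := by
  induction k with
  | zero => intro f p q goal _ _; norm_num
  | succ k ih =>
    intro f p q goal hq hk
    have hkq : (0:Int) ≤ (k : Int) * q := by positivity
    have hpq : q < p := by push_cast at hk ⊢; nlinarith
    have hp1 : ¬ (p = 1 ∧ q = 1) := by rintro ⟨rfl, rfl⟩; omega
    have hstep : (k + 1 + f) = (k + f) + 1 := by omega
    rw [hstep]
    simp only [pvLoopA, if_neg hp1, if_pos hpq]
    rw [ih f (p - q) q (goal * 2 + 1) hq (by push_cast at hk ⊢; linarith)]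
    congr 1
    · try push_cast
      ring
    · try push_cast
      ring

lemma pvLoopA_iter_right (k : Nat) : ∀ (f : Nat) (p q goal : Int), 1 ≤ p → (k : Int) * p < q →
    pvLoopA (k + f) p q goal = pvLoopA f p (q - (k : Int) * p) (goal * 2 ^ k) := by
  induction k with
  | zero => intro f p q goal _ _; norm_num
  | succ k ih =>
    intro f p q goal hp hk
    have hkq : (0:Int) ≤ (k : Int) * p := by positivity
    have hpq : p < q := by push_cast at hk ⊢; nlinarith
    have hp1 : ¬ (p = 1 ∧ q = 1) := by rintro ⟨rfl, rfl⟩; omega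
    have hngt : ¬ p > q := by omega
    have hstep : (k + 1 + f) = (k + f) + 1 := by omega
    rw [hstep]
    simp only [pvLoopA, if_neg hp1, if_neg hngt]
    rw [ih f p (q - p) (goal * 2) hp (by push_cast at hk ⊢; linarith)]
    congr 1
    · try push_cast
      ring
    · try push_cast
      ring

-- main invariant: the loop's accumulator result equals goal shifted by the bit string B computes
lemma pv_main (n : Nat) : ∀ (fa fb : Nat) (p q goal : Int), (p + q).toNat ≤ n →
    1 ≤ p → 1 ≤ q → Int.gcd p q = 1 →
    (p + q - 2).toNat ≤ fa → (p + q - 2).toNat ≤ fb →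
    pvLoopA fa p q goal = goal * 2 ^ (pvBits fb p q).2 + (pvBits fb p q).1 := by
  induction n with
  | zero =>
    intro fa fb p q goal hn hp hq _ _ _
    omega
  | succ n ih =>
    intro fa fb p q goal hn hp hq hg hfa hfb
    by_cases h11 : p = 1 ∧ q = 1
    · obtain ⟨rfl, rfl⟩ := h11
      have hb : ∀ f : Nat, pvBits f 1 1 = (0, 0) := by intro f; cases f <;> simp [pvBits]
      rw [pvLoopA_base, hb]
      norm_num
    · have hne : p ≠ q := by
        intro h; subst h
        have : Int.gcd p p = p.natAbs := Int.gcd_self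
        omega
      rcases lt_or_gt_of_ne hne with hlt | hgt
      · -- p < q: else branch, k = (q-1)//p ≥ 1
        have hppos : (0:Int) < p := hp
        set kI := PySem.Int.floordiv (q - 1) p with hkI
        have hklo : kI * p ≤ q - 1 :=
          (PySem.Int.le_floordiv_iff_mul_le (a := q - 1) (b := p) (q := kI) hppos).mp le_rfl
        have hkhi : q - 1 < (kI + 1) * p :=
          (PySem.Int.floordiv_lt_iff_lt_mul (a := q - 1) (b := p) (q := kI + 1) hppos).mp (by omega)
        have hk1 : 1 ≤ kI := by
          rcases (PySem.Int.le_floordiv_iff_mul_le (a := q - 1) (b := p) (q := 1) hppos) with ⟨_, h2⟩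
          exact h2 (by omega)
        have hkt : ((kI.toNat : Int)) = kI := Int.toNat_of_nonneg (by omega)
        set k := kI.toNat with hk
        have hkp_lt : (k : Int) * p < q := by rw [hkt]; nlinarith
        have hfa1 : fa = k + (fa - k) := by
          have : kI ≤ q - 1 := by nlinarith
          omega
        rw [hfa1, pvLoopA_iter_right k (fa - k) p q goal hp hkp_lt]
        obtain ⟨m, rfl⟩ : ∃ m, fb = m + 1 := ⟨fb - 1, by omega⟩
        have hngt : ¬ p > q := by omega
        simp only [pvBits, if_neg h11, if_neg hngt]
        rw [← hkI, ← hk]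
        set q' := q - (k : Int) * p with hq'
        have hq'1 : 1 ≤ q' := by rw [hq', hkt]; omega
        have hmul1 : 1 ≤ kI * p := by nlinarith
        have hmulk : kI ≤ kI * p := by nlinarith
        have hgcd' : Int.gcd p q' = 1 := by
          have h := Int.gcd_add_mul_right_left p q (-kI)
          rw [hq', hkt, show q - kI * p = q + (-kI) * p by ring, Int.gcd_comm, h, Int.gcd_comm]
          exact hg
        rw [ih (fa - k) m p q' (goal * 2 ^ k) (by rw [hq', hkt]; omega) hp hq'1 hgcd'
          (by rw [hq', hkt]; omega) (by rw [hq', hkt]; omega)]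
        simp only [pow_add]
        ring
      · -- p > q: then branch, k = (p-1)//q ≥ 1
        have hqpos : (0:Int) < q := hq
        set kI := PySem.Int.floordiv (p - 1) q with hkI
        have hklo : kI * q ≤ p - 1 :=
          (PySem.Int.le_floordiv_iff_mul_le (a := p - 1) (b := q) (q := kI) hqpos).mp le_rfl
        have hkhi : p - 1 < (kI + 1) * q :=
          (PySem.Int.floordiv_lt_iff_lt_mul (a := p - 1) (b := q) (q := kI + 1) hqpos).mp (by omega)
        have hk1 : 1 ≤ kI := by
          rcases (PySem.Int.le_floordiv_iff_mul_le (a := p - 1) (b := q) (q := 1) hqpos) with ⟨_, h2⟩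
          exact h2 (by omega)
        have hkt : ((kI.toNat : Int)) = kI := Int.toNat_of_nonneg (by omega)
        set k := kI.toNat with hk
        have hkq_lt : (k : Int) * q < p := by rw [hkt]; nlinarith
        have hfa1 : fa = k + (fa - k) := by
          have : kI ≤ p - 1 := by nlinarith
          omega
        rw [hfa1, pvLoopA_iter_left k (fa - k) p q goal hq hkq_lt]
        obtain ⟨m, rfl⟩ : ∃ m, fb = m + 1 := ⟨fb - 1, by omega⟩
        simp only [pvBits, if_neg h11, if_pos hgt]
        rw [← hkI, ← hk]
        set p' := p - (k : Int) * q with hp'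
        have hp'1 : 1 ≤ p' := by rw [hp', hkt]; omega
        have hmul1 : 1 ≤ kI * q := by nlinarith
        have hmulk : kI ≤ kI * q := by nlinarith
        have hgcd' : Int.gcd p' q = 1 := by
          have h := Int.gcd_add_mul_right_left q p (-kI)
          rw [hp', hkt, show p - kI * q = p + (-kI) * q by ring, h]
          exact hg
        rw [ih (fa - k) m p' q (goal * 2 ^ k + (2 ^ k - 1)) (by rw [hp', hkt]; omega) hp'1 hq hgcd'
          (by rw [hp', hkt]; omega) (by rw [hp', hkt]; omega)]
        simp only [pow_add]
        ring

-- ===== VERDICT (by name: the statement is the Claim_ definition above) =====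
theorem find_goal_spec : Claim_equal_find_goal := by
  intro p q _ hpre
  obtain ⟨hp, hq, hg⟩ := hpre
  unfold Spec_find_goal find_goal find_goal_alt
  rw [pv_main (p + q).toNat (p + q).toNat (p + q).toNat p q 1 le_rfl hp hq hg (by omega) (by omega)]
  ring
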